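-- pv_equiv track=rewrite | github.com/linhdvu14/cp-sols | sols/CodeChef/DEC21B/GRIDSQRS.py | solve
-- ===== SOURCE A (Python) =====
-- def solve(N, grid):
--     # right[r][c] = max consecutive ones from (r, c) to the right
--     right = [[0]*N for _ in range(N)]
--     for r in range(N):
--         cnt = 0
--         for c in range(N-1, -1, -1):
--             right[r][c] = cnt = 0 if grid[r][c] == '0' else cnt + 1
--
--     # down[r][c] = max consecutive ones from (r, c) down
--     down = [[0]*N for _ in range(N)]
--     for c in range(N):
--         cnt = 0
--         for r in range(N-1, -1, -1):
--             down[r][c] = cnt = 0 if grid[r][c] == '0' else cnt + 1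
--
--     # make each (r, c) top left of square
--     res = 0
--     for r in range(N):
--         for c in range(N):
--             if grid[r][c] == '0': continue
--             mx = min(right[r][c], down[r][c])
--             for d in range(mx):
--                 if right[r+d][c] >= d+1 and down[r][c+d] >= d+1:
--                     res += 1
--
--     return res
-- ===== SOURCE B (Python) =====
-- def solve(N, grid):
--     # Direct check of every square frame, no prefix tables.
--     res = 0
--     for r in range(N):
--         for c in range(N):
--             if grid[r][c] == '0':
--                 continue
--             m = min(N - r, N - c)
--             for s in range(1, m + 1):
--                 if (all(grid[r][c + j] != '0' for j in range(s))
--                         and all(grid[r + s - 1][c + j] != '0' for j in range(s))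
--                         and all(grid[r + i][c] != '0' for i in range(s))
--                         and all(grid[r + i][c + s - 1] != '0' for i in range(s))):
--                     res += 1
--     return res
-- ===== Notes on version B (the rewrite author's own statement) =====
-- stated objective: alternative
-- what changed: Replaced A's right/down run-length prefix tables and per-corner table lookups with a direct per-square check: for every top-left corner and side length, B scans the four borders of the candidate frame explicitly, so no auxiliary tables are built.
import Mathlib
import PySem

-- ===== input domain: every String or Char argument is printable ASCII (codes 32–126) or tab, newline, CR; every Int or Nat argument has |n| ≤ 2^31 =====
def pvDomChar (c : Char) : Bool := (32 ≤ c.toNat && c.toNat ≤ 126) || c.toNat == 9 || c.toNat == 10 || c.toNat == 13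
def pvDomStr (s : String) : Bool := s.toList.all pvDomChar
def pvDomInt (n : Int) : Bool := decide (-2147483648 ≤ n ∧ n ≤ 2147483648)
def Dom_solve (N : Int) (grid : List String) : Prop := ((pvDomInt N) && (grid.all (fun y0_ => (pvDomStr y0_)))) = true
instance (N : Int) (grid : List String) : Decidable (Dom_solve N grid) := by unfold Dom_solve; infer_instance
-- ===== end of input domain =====

-- B is an alternative decomposition: it drops A's right/down run-length tables and checks each
-- square frame's four borders directly (same results, no auxiliary tables; not claimed faster).

-- grid[r][c] for the in-range indices the programs use (Pre_solve guarantees they are in range)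
def cellA (grid : List String) (r c : Nat) : Char := ((grid.getD r "").toList.getD c '0')

-- ===== PORT A =====
-- the backward scan 'for c in range(N-1,-1,-1): right[r][c] = cnt = 0 if cell=='0' else cnt+1'
def scanOnes (cs : List Char) : List Int :=
  cs.foldr (fun ch acc => (if ch = '0' then 0 else acc.headD 0 + 1) :: acc) []

-- right[r][c] / down[r][c], A's precomputed tables
def rightT (grid : List String) (n r c : Nat) : Int :=
  (scanOnes ((List.range n).map (fun j => cellA grid r j))).getD c 0
def downT (grid : List String) (n r c : Nat) : Int :=
  (scanOnes ((List.range n).map (fun i => cellA grid i c))).getD r 0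

def solve (N : Int) (grid : List String) : Int :=
  (List.range N.toNat).foldl (fun res r =>
    (List.range N.toNat).foldl (fun res c =>
      if cellA grid r c = '0' then res
      else
        (List.range (min (rightT grid N.toNat r c) (downT grid N.toNat r c)).toNat).foldl
          (fun res d =>
            if (rightT grid N.toNat (r + d) c ≥ (d : Int) + 1 ∧
                downT grid N.toNat r (c + d) ≥ (d : Int) + 1) then res + 1
            else res) res) res) 0

-- ===== PORT B =====
def solve_alt (N : Int) (grid : List String) : Int :=
  (List.range N.toNat).foldl (fun res r =>
    (List.range N.toNat).foldl (fun res c =>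
      if cellA grid r c = '0' then res
      else
        (List.range (min (N.toNat - r) (N.toNat - c))).foldl (fun res k =>
          if (((List.range (k + 1)).all fun j => cellA grid r (c + j) ≠ '0') &&
              ((List.range (k + 1)).all fun j => cellA grid (r + (k + 1) - 1) (c + j) ≠ '0') &&
              ((List.range (k + 1)).all fun i => cellA grid (r + i) c ≠ '0') &&
              ((List.range (k + 1)).all fun i => cellA grid (r + i) (c + (k + 1) - 1) ≠ '0')) = true
          then res + 1 else res) res) res) 0

-- ===== PRECONDITION & SPEC =====
-- A indexes grid[r][c] for all r, c < N; Pre_ excludes exactly the inputs where that raises IndexError.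
def Pre_solve (N : Int) (grid : List String) : Prop :=
  N.toNat ≤ grid.length ∧ ∀ s ∈ grid.take N.toNat, N.toNat ≤ s.length
instance (N : Int) (grid : List String) : Decidable (Pre_solve N grid) := by
  unfold Pre_solve; infer_instance

def pvWitness_solve : Int × List String := (2, ["10", "11"])

def Spec_solve (N : Int) (grid : List String) (out : Int) : Prop := out = solve_alt N grid
instance (N : Int) (grid : List String) (out : Int) : Decidable (Spec_solve N grid out) := by unfold Spec_solve; infer_instance

-- ===== CLAIM (what is proved, stated in full; the proofs are below) =====
def Claim_equal_solve : Prop := ∀ (N : Int) (grid : List String), Dom_solve N grid → Pre_solve N grid → Spec_solve N grid (solve N grid)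

-- ===== LEMMAS AND PROOFS =====

-- run length of leading non-'0' characters
def runL : List Char → Nat
  | [] => 0
  | ch :: t => if ch = '0' then 0 else runL t + 1

theorem scanOnes_getD (cs : List Char) (i : Nat) :
    (scanOnes cs).getD i 0 = (runL (cs.drop i) : Int) := by
  induction cs generalizing i with
  | nil => simp [scanOnes, runL]
  | cons ch t ih =>
    cases i with
    | zero =>
      have h0 : (scanOnes t).headD 0 = ((runL t : Nat) : Int) := by
        have : (scanOnes t).headD 0 = (scanOnes t).getD 0 0 := by cases scanOnes t <;> rfl
        rw [this, ih 0, List.drop_zero]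
      show ((if ch = '0' then 0 else (scanOnes t).headD 0 + 1) :: scanOnes t).getD 0 0 = _
      rw [List.getD_cons_zero, h0]
      by_cases h : ch = '0' <;> simp [runL, h]
    | succ i => simpa [scanOnes] using ih i

theorem runL_ge (cs : List Char) (s : Nat) :
    s ≤ runL cs ↔ s ≤ cs.length ∧ ∀ j < s, cs.getD j '0' ≠ '0' := by
  induction cs generalizing s with
  | nil =>
    cases s with
    | zero => simp
    | succ s =>
      constructor
      · intro h; simp [runL] at h
      · rintro ⟨h, -⟩; simp at h
  | cons ch t ih =>
    cases s with
    | zero => simp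
    | succ s =>
      by_cases h : ch = '0'
      · simp only [runL, if_pos h]
        constructor
        · omega
        · rintro ⟨-, hall⟩
          exact ((hall 0 (Nat.succ_pos s)) (by simp [h])).elim
      · simp only [runL, if_neg h]
        rw [Nat.succ_le_succ_iff, ih s]
        constructor
        · rintro ⟨hl, hall⟩
          refine ⟨by simpa using Nat.succ_le_succ hl, ?_⟩
          intro j hj
          cases j with
          | zero => simpa using h
          | succ j => simpa using hall j (Nat.lt_of_succ_lt_succ hj)
        · rintro ⟨hl, hall⟩
          refine ⟨by simpa using Nat.le_of_succ_le_succ hl, ?_⟩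
          intro j hj
          simpa using hall (j + 1) (Nat.succ_lt_succ hj)

theorem runL_le (cs : List Char) : runL cs ≤ cs.length :=
  ((runL_ge cs (runL cs)).mp le_rfl).1

-- the run value A's tables hold, as a function of a cell accessor f
def runV (f : Nat → Char) (n i : Nat) : Nat := runL (((List.range n).map f).drop i)

theorem getD_drop_map_range (f : Nat → Char) (n i j : Nat) :
    (((List.range n).map f).drop i).getD j '0' = if i + j < n then f (i + j) else '0' := by
  rcases Nat.lt_or_ge (i + j) n with h | h
  · simp [List.getD_eq_getElem?_getD, List.getElem?_drop, h]
  · rw [List.getD_eq_getElem?_getD, List.getElem?_drop, List.getElem?_map,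
      List.getElem?_eq_none (by simpa using h)]
    simp [Nat.not_lt.mpr h]

theorem runV_ge (f : Nat → Char) (n i s : Nat) (hi : i ≤ n) :
    s ≤ runV f n i ↔ i + s ≤ n ∧ ∀ j < s, f (i + j) ≠ '0' := by
  unfold runV
  rw [runL_ge]
  have hlen : (((List.range n).map f).drop i).length = n - i := by simp
  constructor
  · rintro ⟨hl, hall⟩
    rw [hlen] at hl
    refine ⟨by omega, fun j hj => ?_⟩
    have := hall j hj
    rwa [getD_drop_map_range, if_pos (by omega)] at this
  · rintro ⟨hl, hall⟩
    refine ⟨by rw [hlen]; omega, fun j hj => ?_⟩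
    rw [getD_drop_map_range, if_pos (by omega)]
    exact hall j hj

theorem runV_le (f : Nat → Char) (n i : Nat) : runV f n i ≤ n - i := by
  have := runL_le (((List.range n).map f).drop i)
  simpa [runV] using this

theorem rightT_eq (grid : List String) (n r c : Nat) :
    rightT grid n r c = ((runV (fun j => cellA grid r j) n c : Nat) : Int) :=
  scanOnes_getD _ _

theorem downT_eq (grid : List String) (n r c : Nat) :
    downT grid n r c = ((runV (fun i => cellA grid i c) n r : Nat) : Int) :=
  scanOnes_getD _ _

-- countP over a longer range equals countP over a shorter one when the predicate is false in between
theorem countP_range_extend (p : Nat → Bool) (m M : Nat) (hmM : m ≤ M)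
    (hfalse : ∀ d, m ≤ d → d < M → p d = false) :
    (List.range M).countP p = (List.range m).countP p := by
  have hsplit : List.range M = List.range m ++ (List.range (M - m)).map (m + ·) := by
    rw [← List.range_add]; congr 1; omega
  rw [hsplit, List.countP_append, List.countP_map]
  have hz : (List.range (M - m)).countP (p ∘ (m + ·)) = 0 := by
    rw [List.countP_eq_zero]
    intro d hd
    simp only [List.mem_range] at hd
    simp [hfalse (m + d) (by omega) (by omega)]
  omega

theorem solve_eq_solve_alt (N : Int) (grid : List String) :
    solve N grid = solve_alt N grid := by
  unfold solve solve_alt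
  apply PySem.List.foldl_congr_mem
  intro res r hr
  rw [List.mem_range] at hr
  apply PySem.List.foldl_congr_mem
  intro res c hc
  rw [List.mem_range] at hc
  by_cases hcell : cellA grid r c = '0'
  · simp [hcell]
  · rw [if_neg hcell, if_neg hcell]
    set n := N.toNat with hn
    set R : Nat → Nat → Nat := fun r' c' => runV (fun j => cellA grid r' j) n c' with hR
    set D : Nat → Nat → Nat := fun r' c' => runV (fun i => cellA grid i c') n r' with hD
    have hmx : (min (rightT grid n r c) (downT grid n r c)).toNat = min (R r c) (D r c) := by
      rw [rightT_eq, downT_eq]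
      simp only [hR, hD]
      omega
    rw [hmx]
    rw [PySem.List.foldl_ite_add_one, PySem.List.foldl_ite_add_one]
    congr 2
    set M : Nat := min (n - r) (n - c) with hM
    set m : Nat := min (R r c) (D r c) with hm
    have hmle : m ≤ M := by
      have h1 : R r c ≤ n - c := runV_le _ _ _
      have h2 : D r c ≤ n - r := runV_le _ _ _
      omega
    -- B's four border checks, for k < M, in run-length form
    have key : ∀ k, k < M →
        (((((List.range (k + 1)).all fun j => cellA grid r (c + j) ≠ '0') &&
           ((List.range (k + 1)).all fun j => cellA grid (r + (k + 1) - 1) (c + j) ≠ '0') &&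
           ((List.range (k + 1)).all fun i => cellA grid (r + i) c ≠ '0') &&
           ((List.range (k + 1)).all fun i => cellA grid (r + i) (c + (k + 1) - 1) ≠ '0')) = true)
         ↔ (k + 1 ≤ R r c ∧ k + 1 ≤ D r c ∧ k + 1 ≤ R (r + k) c ∧ k + 1 ≤ D r (c + k))) := by
      intro k hk
      have hkc : c + (k + 1) ≤ n := by omega
      have hkr : r + (k + 1) ≤ n := by omega
      have htop := runV_ge (fun j => cellA grid r j) n c (k + 1) (by omega)
      have hbot := runV_ge (fun j => cellA grid (r + k) j) n c (k + 1) (by omega)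
      have hleft := runV_ge (fun i => cellA grid i c) n r (k + 1) (by omega)
      have hrgt := runV_ge (fun i => cellA grid i (c + k)) n r (k + 1) (by omega)
      have e1 : r + (k + 1) - 1 = r + k := by omega
      have e2 : c + (k + 1) - 1 = c + k := by omega
      simp only [List.all_eq_true, List.mem_range, decide_eq_true_eq, Bool.and_eq_true, e1, e2]
      constructor
      · rintro ⟨⟨⟨h1, h2⟩, h3⟩, h4⟩
        exact ⟨htop.mpr ⟨hkc, h1⟩, hleft.mpr ⟨hkr, h3⟩, hbot.mpr ⟨hkc, h2⟩, hrgt.mpr ⟨hkr, h4⟩⟩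
      · rintro ⟨h1, h3, h2, h4⟩
        exact ⟨⟨⟨(htop.mp h1).2, (hbot.mp h2).2⟩, (hleft.mp h3).2⟩, (hrgt.mp h4).2⟩
    -- A's loop condition, in run-length form
    have keyA : ∀ d,
        ((rightT grid n (r + d) c ≥ (d : Int) + 1 ∧ downT grid n r (c + d) ≥ (d : Int) + 1))
        ↔ (d + 1 ≤ R (r + d) c ∧ d + 1 ≤ D r (c + d)) := by
      intro d
      rw [rightT_eq, downT_eq]
      constructor
      · rintro ⟨h1, h2⟩; exact ⟨by exact_mod_cast h1, by exact_mod_cast h2⟩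
      · rintro ⟨h1, h2⟩; exact ⟨by exact_mod_cast h1, by exact_mod_cast h2⟩
    calc (List.range m).countP
            (fun d => decide (rightT grid n (r + d) c ≥ (d : Int) + 1 ∧
                              downT grid n r (c + d) ≥ (d : Int) + 1))
        = (List.range m).countP (fun d => decide (d + 1 ≤ R (r + d) c ∧ d + 1 ≤ D r (c + d))) :=
          List.countP_congr (fun d _ => by simp only [decide_eq_true_eq]; exact keyA d)
      _ = (List.range m).countP (fun k =>
            decide (((((List.range (k + 1)).all fun j => cellA grid r (c + j) ≠ '0') &&
               ((List.range (k + 1)).all fun j => cellA grid (r + (k + 1) - 1) (c + j) ≠ '0') &&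
               ((List.range (k + 1)).all fun i => cellA grid (r + i) c ≠ '0') &&
               ((List.range (k + 1)).all fun i => cellA grid (r + i) (c + (k + 1) - 1) ≠ '0')) = true))) := by
          refine List.countP_congr ?_
          intro d hd
          rw [List.mem_range] at hd
          simp only [decide_eq_true_eq]
          rw [key d (by omega)]
          have hd1 : d + 1 ≤ R r c := by omega
          have hd2 : d + 1 ≤ D r c := by omega
          tauto
      _ = (List.range M).countP (fun k =>
            decide (((((List.range (k + 1)).all fun j => cellA grid r (c + j) ≠ '0') &&
               ((List.range (k + 1)).all fun j => cellA grid (r + (k + 1) - 1) (c + j) ≠ '0') &&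
               ((List.range (k + 1)).all fun i => cellA grid (r + i) c ≠ '0') &&
               ((List.range (k + 1)).all fun i => cellA grid (r + i) (c + (k + 1) - 1) ≠ '0')) = true))) := by
          refine (countP_range_extend _ m M hmle ?_).symm
          intro d hdm hdM
          rw [decide_eq_false_iff_not]
          intro htrue
          obtain ⟨h1, h2, -, -⟩ := (key d hdM).mp htrue
          omega

-- ===== VERDICT (by name: the statement is the Claim_ definition above) =====
theorem solve_spec : Claim_equal_solve := by
  intro N grid _ _
  unfold Spec_solve
  exact solve_eq_solve_alt N grid
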